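-- pv_equiv track=rewrite | github.com/elisakaing/chemistry_lib | chempkg/atom.py | get_orbitales
-- ===== SOURCE A (Python) =====
-- SORTED_ORB = [
--     (1, 0),
--     (2, 0),
--     (2, 1),
--     (3, 0),
--     (3, 1),
--     (4, 0),
--     (3, 2),
--     (4, 1),
--     (5, 0),
--     (4, 2),
--     (5, 1),
--     (6, 0),
--     (4, 3),
--     (5, 2),
--     (6, 1),
--     (7, 0),
--     (5, 3),
--     (6, 2),
--     (7, 1),
-- ]
--
-- def num_elec(l):
--     """l est à valeurs dans 0,1,2 et 3
--     Renvoie le nombre d'atomes sur une orbitale"""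
--     return (l * 2 + 1) * 2
--
-- def get_orbitales(z: int):
--     # Z est le nombre d’électrons de notre atome
--     sorted_orbitales = SORTED_ORB
--     # On commence avec Z électrons à disposer , que l’on va soustraire au fil des orbitales
--     atoms_free = z
--     orbitales_atom = []
--     i = 0
--     while atoms_free > 0:
--         # On sélectionne la bonne orbitale
--         good_orbitale = sorted_orbitales[i]
--         n, l = good_orbitale
--         # Determiner le nombre d’atomes sur cette orbitale
--         atoms_orb = num_elec(l)
--         # Nombre d'atomes dans la couche actuelle
--         num_atom = min(atoms_orb, atoms_free)
--
--         atoms_free -= atoms_orb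
--
--         orbitales_atom.append((n, l, num_atom))
--         i += 1
--     return orbitales_atom
-- ===== SOURCE B (Python) =====
-- SORTED_ORB = [
--     (1, 0), (2, 0), (2, 1), (3, 0), (3, 1), (4, 0), (3, 2), (4, 1), (5, 0),
--     (4, 2), (5, 1), (6, 0), (4, 3), (5, 2), (6, 1), (7, 0), (5, 3), (6, 2), (7, 1),
-- ]
--
-- def get_orbitales(z: int):
--     if z <= 0:
--         return []
--     # running capacities and their prefix sums
--     cum = []
--     total = 0
--     for (_, l) in SORTED_ORB:
--         total += (2 * l + 1) * 2
--         cum.append(total)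
--     # k = first orbital whose cumulative capacity reaches z
--     k = 0
--     while cum[k] < z:   # IndexError naturally when z exceeds total capacity
--         k += 1
--     prev = cum[k - 1] if k > 0 else 0
--     full = [(n, l, (2 * l + 1) * 2) for (n, l) in SORTED_ORB[:k]]
--     n, l = SORTED_ORB[k]
--     return full + [(n, l, z - prev)]
-- ===== Notes on version B (the rewrite author's own statement) =====
-- stated objective: alternative
-- what changed: Instead of A's while-loop that repeatedly subtracts each orbital's capacity from a running remainder, B precomputes the prefix sums of orbital capacities, locates the first index k whose cumulative capacity reaches z, emits all orbitals before k fully filled via a slice+map, and appends the single partial orbital with z minus the previous prefix sum.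
import Mathlib
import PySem

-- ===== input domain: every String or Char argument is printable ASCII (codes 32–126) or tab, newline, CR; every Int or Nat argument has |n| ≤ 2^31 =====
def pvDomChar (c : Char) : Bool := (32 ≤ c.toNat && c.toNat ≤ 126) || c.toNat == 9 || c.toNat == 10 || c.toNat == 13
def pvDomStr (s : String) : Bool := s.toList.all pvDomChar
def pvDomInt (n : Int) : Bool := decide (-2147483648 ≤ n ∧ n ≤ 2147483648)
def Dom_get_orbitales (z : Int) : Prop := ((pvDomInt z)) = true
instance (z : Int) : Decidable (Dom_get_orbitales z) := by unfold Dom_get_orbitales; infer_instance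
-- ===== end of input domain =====

-- B replaces A's running-remainder while-loop by prefix sums of capacities plus a slice
-- (objective: alternative). Pre_ excludes z beyond the total orbital capacity, where both Pythons raise IndexError.


def SORTED_ORB : List (Int × Int) :=
  [(1, 0), (2, 0), (2, 1), (3, 0), (3, 1), (4, 0), (3, 2), (4, 1), (5, 0),
   (4, 2), (5, 1), (6, 0), (4, 3), (5, 2), (6, 1), (7, 0), (5, 3), (6, 2), (7, 1)]

-- ===== PORT A =====
-- num_elec(l) = (l * 2 + 1) * 2, inlined at its call site below
-- the while-loop: recursion over the remaining orbital list with the running remainder;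
-- the [] case is where Python's sorted_orbitales[i] raises IndexError (excluded by Pre_)
def pvLoopA : List (Int × Int) → Int → List (Int × Int × Int)
  | [], _ => []
  | (n, l) :: rest, atoms_free =>
    if atoms_free > 0 then
      (n, l, min ((l * 2 + 1) * 2) atoms_free) :: pvLoopA rest (atoms_free - (l * 2 + 1) * 2)
    else []

def get_orbitales (z : Int) : List (Int × Int × Int) := pvLoopA SORTED_ORB z

-- ===== PORT B =====
-- cum: prefix sums of the orbital capacities (B's first for-loop)
def pvCum : List (Int × Int) → Int → List Int
  | [], _ => []
  | (_, l) :: rest, total =>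
    (total + (2 * l + 1) * 2) :: pvCum rest (total + (2 * l + 1) * 2)

-- B's `while cum[k] < z: k += 1`; the [] case is where Python's cum[k] raises IndexError
def pvFind (z : Int) : List Int → Nat → Nat
  | [], k => k
  | c :: rest, k => if c < z then pvFind z rest (k + 1) else k

def get_orbitales_alt (z : Int) : List (Int × Int × Int) :=
  if z ≤ 0 then []
  else
    let cum := pvCum SORTED_ORB 0
    let k := pvFind z cum 0
    let prev := if k > 0 then cum.getD (k - 1) 0 else 0
    let full := (SORTED_ORB.take k).map (fun p => (p.1, p.2, (2 * p.2 + 1) * 2))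
    match SORTED_ORB[k]? with
    | some (n, l) => full ++ [(n, l, z - prev)]
    | none => full   -- Python raises IndexError here (z exceeds total capacity, excluded by Pre_)

-- ===== PRECONDITION & SPEC =====
-- Pre_ excludes z above the total capacity of the listed orbitals: there both
-- A and B raise IndexError when indexing past the end of their lists.
def Pre_get_orbitales (z : Int) : Prop := z ≤ 118
instance (z : Int) : Decidable (Pre_get_orbitales z) := by unfold Pre_get_orbitales; infer_instance
def pvWitness_get_orbitales : Int := 26

def Spec_get_orbitales (z : Int) (out : List (Int × Int × Int)) : Prop := out = get_orbitales_alt z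
instance (z : Int) (out : List (Int × Int × Int)) : Decidable (Spec_get_orbitales z out) := by unfold Spec_get_orbitales; infer_instance

-- ===== CLAIM (what is proved, stated in full; the proofs are below) =====
def Claim_equal_get_orbitales : Prop := ∀ (z : Int), Dom_get_orbitales z → Pre_get_orbitales z → Spec_get_orbitales z (get_orbitales z)

-- ===== LEMMAS AND PROOFS =====

theorem pvA_nonpos (z : Int) (h : z ≤ 0) : get_orbitales z = [] := by
  simp [get_orbitales, SORTED_ORB, pvLoopA]
  omega

theorem pvB_nonpos (z : Int) (h : z ≤ 0) : get_orbitales_alt z = [] := by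
  simp [get_orbitales_alt, h]

theorem pv_small : ∀ n : Nat, n < 119 → get_orbitales (Int.ofNat n) = get_orbitales_alt (Int.ofNat n) := by
  decide

-- ===== VERDICT (by name: the statement is the Claim_ definition above) =====
theorem get_orbitales_spec : Claim_equal_get_orbitales := by
  intro z _ hpre
  unfold Spec_get_orbitales
  by_cases hz : z ≤ 0
  · rw [pvA_nonpos z hz, pvB_nonpos z hz]
  · have hz' : z = Int.ofNat z.toNat := (Int.toNat_of_nonneg (by omega)).symm
    rw [hz']
    exact pv_small z.toNat (by unfold Pre_get_orbitales at hpre; omega)
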